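-- pv_equiv track=rewrite | github.com/Ansebi/Training | support_module.py | get_var_chars
-- ===== SOURCE A (Python) =====
-- def get_var_chars(nx: str) -> str:
--     """
--     :param nx: string like '-28.7ab'
--     :return: '-28.7ab' would return 'ab'
--     """
--     num_chars = ' .,-0123456789'
--     var_region = False
--     var_part = ''
--     for i in nx:
--         if i not in num_chars:
--             var_region = True
--         if var_region:
--             var_part += i
--     return var_part
-- ===== SOURCE B (Python) =====
-- import re
--
-- def get_var_chars(nx: str) -> str:
--     m = re.search(r'[^ .,\-0-9]', nx)
--     return nx[m.start():] if m else ''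
-- ===== Notes on version B (the rewrite author's own statement) =====
-- stated objective: idiomatic
-- what changed: Replaces the manual char-by-char scan with a boolean flag and string accumulation by a single regex search for the first non-numeric character followed by one slice.
import Mathlib
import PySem

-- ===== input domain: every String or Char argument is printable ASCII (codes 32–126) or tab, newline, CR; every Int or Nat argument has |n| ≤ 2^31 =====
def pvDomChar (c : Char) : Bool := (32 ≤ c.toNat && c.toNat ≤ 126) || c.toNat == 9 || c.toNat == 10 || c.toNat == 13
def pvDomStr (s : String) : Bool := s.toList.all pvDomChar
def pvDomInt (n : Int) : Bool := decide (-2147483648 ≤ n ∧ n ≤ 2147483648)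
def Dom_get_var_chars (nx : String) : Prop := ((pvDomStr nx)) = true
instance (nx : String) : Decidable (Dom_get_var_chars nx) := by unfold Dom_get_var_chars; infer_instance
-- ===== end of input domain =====

-- B replaces A's manual flag-and-accumulate scan by a regex-style search for the
-- first non-numeric character plus a single slice (idiomatic; same result).


-- ===== PORT A =====
-- num_chars = ' .,-0123456789'
def numChars : List Char := " .,-0123456789".toList

-- one step of A's for-loop over state (var_region, var_part)
def aStep (st : Bool × List Char) (i : Char) : Bool × List Char :=
  let vr := if ¬ numChars.contains i then true else st.1
  let vp := if vr then st.2 ++ [i] else st.2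
  (vr, vp)

def get_var_chars (nx : String) : String :=
  String.ofList (nx.toList.foldl aStep (false, [])).2

-- ===== PORT B =====
-- re.search(r'[^ .,\-0-9]', nx) : first index whose char is outside the numeric set
def isVarChar (c : Char) : Bool := ! numChars.contains c

def get_var_chars_alt (nx : String) : String :=
  match nx.toList.findIdx? isVarChar with
  | none => ""
  | some i => String.ofList (nx.toList.drop i)

-- ===== PRECONDITION & SPEC =====
def Spec_get_var_chars (nx : String) (out : String) : Prop := out = get_var_chars_alt nx
instance (nx : String) (out : String) : Decidable (Spec_get_var_chars nx out) := by unfold Spec_get_var_chars; infer_instance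

-- ===== CLAIM (what is proved, stated in full; the proofs are below) =====
def Claim_equal_get_var_chars : Prop := ∀ (nx : String), Dom_get_var_chars nx → Spec_get_var_chars nx (get_var_chars nx)

-- ===== LEMMAS AND PROOFS =====

-- once the flag is true, A appends every remaining character
theorem aStep_true (l : List Char) (acc : List Char) :
    l.foldl aStep (true, acc) = (true, acc ++ l) := by
  induction l generalizing acc with
  | nil => simp
  | cons c t ih => simp [aStep, ih]

-- A's accumulated suffix equals the drop at the first non-numeric index
theorem aFold_eq_drop (l : List Char) :
    (l.foldl aStep (false, [])).2 =
      (match l.findIdx? isVarChar with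
       | none => []
       | some i => l.drop i) := by
  induction l with
  | nil => simp
  | cons c t ih =>
    by_cases h : c ∈ numChars
    · have hv : isVarChar c = false := by simp [isVarChar, List.contains_iff_mem, h]
      have h1 : (c :: t).foldl aStep (false, []) = t.foldl aStep (false, []) := by
        simp [aStep, List.contains_iff_mem, h]
      rw [h1, ih, List.findIdx?_cons, hv]
      cases hfi : t.findIdx? isVarChar <;> simp
    · have hv : isVarChar c = true := by simp [isVarChar, List.contains_iff_mem, h]
      have h1 : (c :: t).foldl aStep (false, []) = (true, c :: t) := by
        simp [aStep, List.contains_iff_mem, h, aStep_true]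
      simp [h1, List.findIdx?_cons, hv]

-- ===== VERDICT (by name: the statement is the Claim_ definition above) =====
theorem get_var_chars_spec : Claim_equal_get_var_chars := by
  intro nx _
  unfold Spec_get_var_chars get_var_chars get_var_chars_alt
  rw [aFold_eq_drop]
  cases h : nx.toList.findIdx? isVarChar with
  | none => rfl
  | some i => rfl
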